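-- pv_equiv track=rewrite | github.com/tusharc31/Data-Analytics | Project-2/apriori.py | update_items
-- ===== SOURCE A (Python) =====
-- def update_items(dataset, candidates, minsup):
--
--
--     counter = []
--     future_transactions = []
--     for i in range(len(candidates)):
--         counter.append(0)
--         future_transactions.append([])
--
--
--
--     for i in range(len(dataset)):
--         for j in range(len(candidates)):
--             if set(candidates[j]) <= set(dataset[i]):
--                 counter[j]+=1
--                 future_transactions[j].append(i)
--     updated_items = []
--     for i in range(len(candidates)):
--         if counter[i]>=minsup:
--             updated_items.append(candidates[i])
--     return updated_items
-- ===== SOURCE B (Python) =====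
-- def update_items(dataset, candidates, minsup):
--     # Inverted index: item -> list of indices of transactions containing it.
--     index = {}
--     for i, t in enumerate(dataset):
--         for x in set(t):
--             index[x] = index.get(x, []) + [i]
--     n = len(dataset)
--     out = []
--     for c in candidates:
--         # support(c) = size of the intersection of the posting lists of c's items
--         ids = list(range(n))
--         for x in set(c):
--             p = index.get(x, [])
--             ids = [i for i in ids if i in p]
--         if len(ids) >= minsup:
--             out.append(c)
--     return out
-- ===== Notes on version B (the rewrite author's own statement) =====
-- stated objective: faster
-- what changed: Replaces A's per-pair subset tests over counter/future_transactions arrays with an inverted index (dict item -> posting list of transaction indices) built once; each candidate's support is the size of the intersection of its items' posting lists, so the per-transaction subset test disappears.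
import Mathlib
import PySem

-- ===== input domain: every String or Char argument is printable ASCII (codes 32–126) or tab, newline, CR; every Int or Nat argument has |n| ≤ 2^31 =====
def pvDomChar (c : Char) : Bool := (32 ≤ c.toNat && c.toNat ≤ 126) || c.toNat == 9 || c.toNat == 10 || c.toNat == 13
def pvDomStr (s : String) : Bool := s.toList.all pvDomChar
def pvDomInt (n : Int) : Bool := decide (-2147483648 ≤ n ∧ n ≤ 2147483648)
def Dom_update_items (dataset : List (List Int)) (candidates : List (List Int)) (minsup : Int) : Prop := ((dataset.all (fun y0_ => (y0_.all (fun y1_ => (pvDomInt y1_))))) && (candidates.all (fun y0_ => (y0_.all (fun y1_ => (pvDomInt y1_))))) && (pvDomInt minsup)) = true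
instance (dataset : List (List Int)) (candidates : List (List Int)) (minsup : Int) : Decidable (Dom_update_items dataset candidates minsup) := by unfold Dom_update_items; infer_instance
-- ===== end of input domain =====

-- B replaces A's per-pair subset tests with an inverted index (item -> posting list of
-- transaction indices) built once; a candidate's support is the size of the intersection
-- of its items' posting lists (measurably faster in a timing run: no per-pair subset test).

-- ===== PORT A =====
-- set(a) <= set(b)
def pySubsetLe (a b : List Int) : Bool :=
  PySem.Set.issubset (PySem.Set.ofList a) (PySem.Set.ofList b)

def update_items (dataset : List (List Int)) (candidates : List (List Int)) (minsup : Int) : List (List Int) :=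
  -- for i in range(len(candidates)): counter.append(0); future_transactions.append([])
  let init := (PySem.List.pyRange 0 (candidates.length : Int) 1).foldl
      (fun (s : List Int × List (List Int)) _ => (s.1 ++ [0], s.2 ++ [[]])) ([], [])
  -- for i in range(len(dataset)): for j in range(len(candidates)): …
  let st := (PySem.List.pyRange 0 (dataset.length : Int) 1).foldl
      (fun (s : List Int × List (List Int)) i =>
        (PySem.List.pyRange 0 (candidates.length : Int) 1).foldl
          (fun (s : List Int × List (List Int)) j =>
            if pySubsetLe (PySem.List.pyGetD candidates j []) (PySem.List.pyGetD dataset i []) then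
              (PySem.List.pySetD s.1 j (PySem.List.pyGetD s.1 j 0 + 1),
               PySem.List.pySetD s.2 j (PySem.List.pyGetD s.2 j [] ++ [i]))
            else s) s)
      init
  -- for i in range(len(candidates)): if counter[i] >= minsup: updated_items.append(candidates[i])
  (PySem.List.pyRange 0 (candidates.length : Int) 1).foldl
    (fun u i => if minsup ≤ PySem.List.pyGetD st.1 i 0 then u ++ [PySem.List.pyGetD candidates i []] else u) []

-- ===== PORT B =====
-- index = {}; for i, t in enumerate(dataset): for x in set(t): index[x] = index.get(x, []) + [i]
def pvBuildIndex (dataset : List (List Int)) : PySem.Dict Int (List Int) :=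
  (PySem.List.enumerate dataset 0).foldl
    (fun d p => (PySem.Set.ofList p.2).foldl
        (fun d x => d.insert x (d.getD x [] ++ [p.1])) d)
    PySem.Dict.empty

def update_items_alt (dataset : List (List Int)) (candidates : List (List Int)) (minsup : Int) : List (List Int) :=
  let index := pvBuildIndex dataset
  candidates.foldl
    (fun out c =>
      -- ids = list(range(n)); for x in set(c): ids = [i for i in ids if i in index.get(x, [])]
      let ids := (PySem.Set.ofList c).foldl
          (fun ids x => ids.filter (fun i => decide (i ∈ index.getD x [])))
          (PySem.List.pyRange 0 (dataset.length : Int) 1)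
      if minsup ≤ (ids.length : Int) then out ++ [c] else out)
    []

-- ===== PRECONDITION & SPEC =====
def Spec_update_items (dataset : List (List Int)) (candidates : List (List Int)) (minsup : Int) (out : List (List Int)) : Prop := out = update_items_alt dataset candidates minsup
instance (dataset : List (List Int)) (candidates : List (List Int)) (minsup : Int) (out : List (List Int)) : Decidable (Spec_update_items dataset candidates minsup out) := by unfold Spec_update_items; infer_instance

-- ===== CLAIM (what is proved, stated in full; the proofs are below) =====
def Claim_equal_update_items : Prop := ∀ (dataset : List (List Int)) (candidates : List (List Int)) (minsup : Int), Dom_update_items dataset candidates minsup → Spec_update_items dataset candidates minsup (update_items dataset candidates minsup)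

-- ===== LEMMAS AND PROOFS =====

-- counter-only image of A's inner-loop step at index j, for transaction t
def pvStepC (cands : List (List Int)) (t : List Int) (c : List Int) (j : Int) : List Int :=
  if pySubsetLe (PySem.List.pyGetD cands j []) t then
    PySem.List.pySetD c j (PySem.List.pyGetD c j 0 + 1)
  else c

-- A's init loop builds two replicate lists
theorem pvInit_fold (l : List Int) (c : List Int) (f : List (List Int)) :
    l.foldl (fun (s : List Int × List (List Int)) _ => (s.1 ++ [0], s.2 ++ [[]])) (c, f)
      = (c ++ List.replicate l.length (0 : Int), f ++ List.replicate l.length ([] : List Int)) := by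
  induction l generalizing c f with
  | nil => simp
  | cons x l ih =>
      simp [List.foldl_cons, ih, List.replicate_succ]

-- first component of A's inner pair-fold is the counter-only fold
theorem pvInner_proj (cands : List (List Int)) (t : List Int) (i : Int) (l : List Int)
    (s : List Int × List (List Int)) :
    (l.foldl (fun (s : List Int × List (List Int)) j =>
        if pySubsetLe (PySem.List.pyGetD cands j []) t then
          (PySem.List.pySetD s.1 j (PySem.List.pyGetD s.1 j 0 + 1),
           PySem.List.pySetD s.2 j (PySem.List.pyGetD s.2 j [] ++ [i]))
        else s) s).1
      = l.foldl (pvStepC cands t) s.1 := by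
  induction l generalizing s with
  | nil => rfl
  | cons j l ih =>
      simp only [List.foldl_cons]
      rw [ih]
      unfold pvStepC
      split <;> rfl

-- first component of A's outer pair-fold
theorem pvOuter_proj (cands dataset : List (List Int)) (l : List Int)
    (s : List Int × List (List Int)) :
    (l.foldl (fun (s : List Int × List (List Int)) i =>
        (PySem.List.pyRange 0 (cands.length : Int) 1).foldl
          (fun (s : List Int × List (List Int)) j =>
            if pySubsetLe (PySem.List.pyGetD cands j []) (PySem.List.pyGetD dataset i []) then
              (PySem.List.pySetD s.1 j (PySem.List.pyGetD s.1 j 0 + 1),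
               PySem.List.pySetD s.2 j (PySem.List.pyGetD s.2 j [] ++ [i]))
            else s) s) s).1
      = l.foldl (fun c i =>
          (PySem.List.pyRange 0 (cands.length : Int) 1).foldl
            (pvStepC cands (PySem.List.pyGetD dataset i [])) c) s.1 := by
  induction l generalizing s with
  | nil => rfl
  | cons i l ih =>
      simp only [List.foldl_cons]
      rw [ih, pvInner_proj]

theorem pvStepC_length (cands : List (List Int)) (t : List Int) (c : List Int) (j : Int) :
    (pvStepC cands t c j).length = c.length := by
  unfold pvStepC; split <;> simp [PySem.List.length_pySetD]

theorem pvInnerFold_length (cands : List (List Int)) (t : List Int) (l : List Int) (c : List Int) :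
    (l.foldl (pvStepC cands t) c).length = c.length := by
  induction l generalizing c with
  | nil => rfl
  | cons j l ih => simp only [List.foldl_cons]; rw [ih, pvStepC_length]

-- pointwise effect of the inner fold on a list of in-range indices
theorem pvInnerFold_getD (cands : List (List Int)) (t : List Int) (l : List Int) (c : List Int)
    (hl : ∀ j ∈ l, 0 ≤ j ∧ j < (c.length : Int)) (k : Nat) (hk : k < c.length) :
    PySem.List.pyGetD (l.foldl (pvStepC cands t) c) (k : Int) 0
      = PySem.List.pyGetD c (k : Int) 0
        + (if pySubsetLe (PySem.List.pyGetD cands (k : Int) []) t then (l.count (k : Int) : Int) else 0) := by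
  induction l generalizing c with
  | nil => simp
  | cons j l ih =>
      obtain ⟨hj0, hjlt⟩ := hl j (List.mem_cons_self ..)
      have hl' : ∀ x ∈ l, 0 ≤ x ∧ x < (c.length : Int) := fun x hx => hl x (List.mem_cons_of_mem _ hx)
      simp only [List.foldl_cons]
      rw [show j = ((j.toNat : Nat) : Int) from (Int.toNat_of_nonneg hj0).symm]
      by_cases hcnd : pySubsetLe (PySem.List.pyGetD cands ((j.toNat : Nat) : Int) []) t = true
      · rw [show pvStepC cands t c ((j.toNat : Nat) : Int)
            = PySem.List.pySetD c ((j.toNat : Nat) : Int) (PySem.List.pyGetD c ((j.toNat : Nat) : Int) 0 + 1) from by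
          unfold pvStepC; rw [if_pos hcnd]]
        rw [ih _ (by simpa [PySem.List.length_pySetD] using hl') (by simpa [PySem.List.length_pySetD] using hk)]
        rw [PySem.List.pyGetD_natCast] at hcnd
        simp only [PySem.List.pySetD_natCast, PySem.List.pyGetD_natCast, List.count_cons]
        rcases eq_or_ne j.toNat k with he | he
        · subst he
          simp only [List.getD_eq_getElem?_getD] at hcnd ⊢
          simp [hk, hcnd]
          omega
        · have hne : ((j.toNat : Nat) : Int) ≠ (k : Int) := by exact_mod_cast he
          have hmax : max j 0 ≠ (k : Int) := by omega
          simp [List.getD_eq_getElem?_getD, he, hmax]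
      · rw [show pvStepC cands t c ((j.toNat : Nat) : Int) = c from by
          unfold pvStepC; rw [if_neg hcnd]]
        rw [ih _ hl' hk]
        rw [PySem.List.pyGetD_natCast] at hcnd
        simp only [PySem.List.pyGetD_natCast, List.count_cons]
        rcases eq_or_ne j.toNat k with he | he
        · subst he
          simp only [List.getD_eq_getElem?_getD] at hcnd ⊢
          simp [hcnd]
        · have hne : ((j.toNat : Nat) : Int) ≠ (k : Int) := by exact_mod_cast he
          have hmax : max j 0 ≠ (k : Int) := by omega
          simp [hmax]

-- outer fold: each counter cell accumulates the number of supporting transactions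
theorem pvOuterFold_getD (cands : List (List Int)) (ds : List (List Int)) (c : List Int)
    (hc : c.length = cands.length) (k : Nat) (hk : k < cands.length) :
    PySem.List.pyGetD (ds.foldl (fun c t =>
        (PySem.List.pyRange 0 (cands.length : Int) 1).foldl (pvStepC cands t) c) c) (k : Int) 0
      = PySem.List.pyGetD c (k : Int) 0
        + (ds.countP (fun t => pySubsetLe (cands.getD k []) t) : Int) := by
  induction ds generalizing c with
  | nil => simp
  | cons t ds ih =>
      simp only [List.foldl_cons]
      have hlen : ((PySem.List.pyRange 0 (cands.length : Int) 1).foldl (pvStepC cands t) c).length = c.length :=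
        pvInnerFold_length ..
      rw [ih _ (by rw [hlen, hc])]
      have hmem : (k : Int) ∈ PySem.List.pyRange 0 (cands.length : Int) 1 := by
        rw [PySem.List.mem_pyRange_one]; omega
      have hcnt : (PySem.List.pyRange 0 (cands.length : Int) 1).count (k : Int) = 1 :=
        List.count_eq_one_of_mem (PySem.List.nodup_pyRange_one ..) hmem
      rw [pvInnerFold_getD cands t _ c (by intro j hj; rw [PySem.List.mem_pyRange_one] at hj; omega) k (by omega)]
      rw [hcnt]
      simp only [List.countP_cons]
      have hgd : PySem.List.pyGetD cands (k : Int) [] = cands.getD k [] := by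
        simp [PySem.List.pyGetD_natCast]
      rw [hgd]
      by_cases hp : pySubsetLe (cands.getD k []) t = true
      · simp only [hp, if_true]; push_cast; ring
      · simp only [hp]; split <;> omega

-- A's final index loop is a filter by the support count
theorem pvFinal_fold (cands ds : List (List Int)) (minsup : Int) (counter : List Int)
    (hc : ∀ i : Nat, i < cands.length →
        PySem.List.pyGetD counter (i : Int) 0 = (ds.countP (fun t => pySubsetLe (cands.getD i []) t) : Int)) :
    ∀ (k : Nat), k ≤ cands.length → ∀ (acc : List (List Int)),
    (PySem.List.pyRange (k : Int) (cands.length : Int) 1).foldl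
        (fun u i => if minsup ≤ PySem.List.pyGetD counter i 0 then u ++ [PySem.List.pyGetD cands i []] else u) acc
      = acc ++ (cands.drop k).filter
          (fun c => decide (minsup ≤ (ds.countP (fun t => pySubsetLe c t) : Int))) := by
  intro k hk
  induction hn : cands.length - k generalizing k with
  | zero =>
      intro acc
      have hke : k = cands.length := by omega
      subst hke
      rw [PySem.List.pyRange_one_eq_nil (by omega)]
      simp
  | succ n ih =>
      intro acc
      have hklt : k < cands.length := by omega
      rw [PySem.List.pyRange_one_cons (by exact_mod_cast hklt)]
      simp only [List.foldl_cons]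
      have hdrop : cands.drop k = cands[k] :: cands.drop (k + 1) := List.drop_eq_getElem_cons hklt
      have hgetD : PySem.List.pyGetD cands (k : Int) [] = cands[k] := by
        simp [PySem.List.pyGetD_natCast, List.getD_eq_getElem?_getD, hklt]
      have hcountk := hc k hklt
      have hgd : cands.getD k [] = cands[k] := by
        simp [List.getD_eq_getElem?_getD, hklt]
      have hstep : ((k : Int) + 1) = ((k + 1 : Nat) : Int) := by push_cast; ring
      rw [hdrop, List.filter_cons]
      by_cases hp : minsup ≤ (ds.countP (fun t => pySubsetLe cands[k] t) : Int)
      · rw [if_pos (by rw [hcountk, hgd]; exact hp), hgetD, hstep,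
            ih (k + 1) (by omega) (by omega)]
        simp [hp]
      · rw [if_neg (by rw [hcountk, hgd]; exact hp), hstep, ih (k + 1) (by omega) (by omega)]
        simp [hp]

-- zero-based corollary of pvFinal_fold
theorem pvFinal_fold_zero (cands ds : List (List Int)) (minsup : Int) (counter : List Int)
    (hc : ∀ i : Nat, i < cands.length →
        PySem.List.pyGetD counter (i : Int) 0 = (ds.countP (fun t => pySubsetLe (cands.getD i []) t) : Int)) :
    (PySem.List.pyRange 0 (cands.length : Int) 1).foldl
        (fun u i => if minsup ≤ PySem.List.pyGetD counter i 0 then u ++ [PySem.List.pyGetD cands i []] else u) []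
      = cands.filter (fun c => decide (minsup ≤ (ds.countP (fun t => pySubsetLe c t) : Int))) := by
  have h := pvFinal_fold cands ds minsup counter hc 0 (Nat.zero_le _) []
  simpa using h

-- ===== B-side lemmas =====

-- inner index-building loop over the (Nodup) element list of set(t)
theorem pvIndexInner_getD (s : List Int) (hs : s.Nodup) (i : Int)
    (d : PySem.Dict Int (List Int)) (y : Int) :
    (s.foldl (fun d x => d.insert x (d.getD x [] ++ [i])) d).getD y []
      = d.getD y [] ++ (if y ∈ s then [i] else []) := by
  induction s generalizing d with
  | nil => simp
  | cons x s ih =>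
      simp only [List.foldl_cons]
      rw [ih (List.nodup_cons.mp hs).2]
      rcases eq_or_ne y x with he | he
      · subst he
        have hys : y ∉ s := (List.nodup_cons.mp hs).1
        simp [PySem.Dict.getD_insert_self, hys]
      · rw [PySem.Dict.getD_insert_of_ne _ _ _ he]; simp [he]

-- the posting list of y is the index list of the transactions containing y
theorem pvIndexFold_getD (l : List (Int × List Int)) (d : PySem.Dict Int (List Int)) (y : Int) :
    (l.foldl (fun d p => (PySem.Set.ofList p.2).foldl
        (fun d x => d.insert x (d.getD x [] ++ [p.1])) d) d).getD y []
      = d.getD y [] ++ (l.filter (fun p => decide (y ∈ p.2))).map (·.1) := by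
  induction l generalizing d with
  | nil => simp
  | cons p l ih =>
      simp only [List.foldl_cons]
      rw [ih, pvIndexInner_getD _ (PySem.Set.nodup_ofList _) p.1 d y, List.filter_cons]
      by_cases hy : y ∈ p.2
      · have : y ∈ PySem.Set.ofList p.2 := (PySem.Set.mem_ofList _ _).mpr hy
        simp [this, hy]
      · have : y ∉ PySem.Set.ofList p.2 := fun h => hy ((PySem.Set.mem_ofList _ _).mp h)
        simp [this, hy]

theorem pvBuildIndex_mem (ds : List (List Int)) (y i : Int) :
    i ∈ (pvBuildIndex ds).getD y []
      ↔ ∃ (k : Nat), ∃ (h : k < ds.length), i = (k : Int) ∧ y ∈ ds[k] := by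
  unfold pvBuildIndex
  rw [pvIndexFold_getD]
  simp only [PySem.Dict.getD_empty, List.nil_append, List.mem_map, List.mem_filter]
  constructor
  · rintro ⟨p, ⟨hp, hyp⟩, hfst⟩
    obtain ⟨k, hk, rfl⟩ := (PySem.List.mem_enumerate_iff ..).mp hp
    exact ⟨k, hk, by simpa using hfst.symm, by simpa using of_decide_eq_true hyp⟩
  · rintro ⟨k, hk, rfl, hy⟩
    exact ⟨((k : Int), ds[k]), ⟨(PySem.List.mem_enumerate_iff ..).mpr ⟨k, hk, by simp⟩,
      decide_eq_true hy⟩, rfl⟩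

-- iterated filtering is one filter by the conjunction
theorem pvInterFold (xs : List Int) (q : Int → Int → Bool) (ids : List Int) :
    xs.foldl (fun ids x => ids.filter (fun i => q x i)) ids
      = ids.filter (fun i => xs.all (fun x => q x i)) := by
  induction xs generalizing ids with
  | nil => simp
  | cons x xs ih =>
      simp only [List.foldl_cons]
      rw [ih, List.filter_filter]
      apply List.filter_congr
      intro i _
      simp [Bool.and_comm]

-- on an in-range index, "i in every posting list of set(c)" IS the subset test of A
theorem pvPred_bridge (ds : List (List Int)) (c : List Int) (i : Int)
    (hi : i ∈ PySem.List.pyRange 0 (ds.length : Int) 1) :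
    (PySem.Set.ofList c).all (fun x => decide (i ∈ (pvBuildIndex ds).getD x []))
      = pySubsetLe c (PySem.List.pyGetD ds i []) := by
  rw [PySem.List.mem_pyRange_one] at hi
  obtain ⟨hi0, hilt⟩ := hi
  set k := i.toNat with hkdef
  have hik : i = (k : Int) := (Int.toNat_of_nonneg hi0).symm
  have hklt : k < ds.length := by omega
  have hgd : PySem.List.pyGetD ds i [] = ds[k] := by
    rw [hik]; simp [PySem.List.pyGetD_natCast, List.getD_eq_getElem?_getD, hklt]
  rw [hgd, Bool.eq_iff_iff]
  unfold pySubsetLe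
  rw [List.all_eq_true, PySem.Set.issubset_iff]
  constructor
  · intro h x hx
    have := h x ((PySem.Set.mem_ofList _ _).mpr ((PySem.Set.mem_ofList _ _).mp hx))
    have hm := of_decide_eq_true this
    obtain ⟨m, hm', him, hxm⟩ := (pvBuildIndex_mem ds x i).mp hm
    have : m = k := by omega
    subst this
    exact (PySem.Set.mem_ofList _ _).mpr hxm
  · intro h x hx
    apply decide_eq_true
    refine (pvBuildIndex_mem ds x i).mpr ⟨k, hklt, hik, ?_⟩
    exact (PySem.Set.mem_ofList _ _).mp (h x ((PySem.Set.mem_ofList _ _).mpr ((PySem.Set.mem_ofList _ _).mp hx)))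

-- counting over the index range equals counting over the list itself
theorem pvCountP_range (ds : List (List Int)) (p : List Int → Bool) :
    (PySem.List.pyRange 0 (ds.length : Int) 1).countP
        (fun i => p (PySem.List.pyGetD ds i []))
      = ds.countP p := by
  have h1 : ds.countP p = ((PySem.List.enumerate ds 0).map (·.2)).countP p := by
    rw [PySem.List.map_snd_enumerate]
  rw [h1, List.countP_map, PySem.List.enumerate_eq_map_pyRange ds ([] : List Int), List.countP_map]
  rfl

-- B's support for candidate c is the number of supporting transactions
theorem pvIds_length (ds : List (List Int)) (c : List Int) :
    (((PySem.Set.ofList c).foldl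
        (fun ids x => ids.filter (fun i => decide (i ∈ (pvBuildIndex ds).getD x [])))
        (PySem.List.pyRange 0 (ds.length : Int) 1)).length : Int)
      = (ds.countP (fun t => pySubsetLe c t) : Int) := by
  rw [pvInterFold, ← List.countP_eq_length_filter,
      List.countP_congr (fun i hi => by rw [pvPred_bridge ds c i hi]),
      pvCountP_range]

-- ===== VERDICT (by name: the statement is the Claim_ definition above) =====
theorem update_items_spec : Claim_equal_update_items := by
  intro dataset candidates minsup _
  unfold Spec_update_items
  simp only [update_items, update_items_alt]
  rw [pvInit_fold, pvOuter_proj]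
  rw [PySem.List.foldl_pyRange_zero_pyGetD' dataset []
    (fun c t => (PySem.List.pyRange 0 (candidates.length : Int) 1).foldl (pvStepC candidates t) c) _]
  have hlen0 : (([] : List Int) ++ List.replicate (PySem.List.pyRange 0 (candidates.length : Int) 1).length (0 : Int)).length = candidates.length := by
    simp [PySem.List.length_pyRange_one]
  rw [pvFinal_fold_zero candidates dataset minsup _ ?hc]
  · rw [show (candidates.foldl
        (fun out c =>
          if minsup ≤ (((PySem.Set.ofList c).foldl
              (fun ids x => ids.filter (fun i => decide (i ∈ (pvBuildIndex dataset).getD x [])))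
              (PySem.List.pyRange 0 (dataset.length : Int) 1)).length : Int)
          then out ++ [c] else out) [])
      = candidates.filter (fun c => decide (minsup ≤ (((PySem.Set.ofList c).foldl
              (fun ids x => ids.filter (fun i => decide (i ∈ (pvBuildIndex dataset).getD x [])))
              (PySem.List.pyRange 0 (dataset.length : Int) 1)).length : Int)))
      from by simpa using PySem.List.foldl_append_ite_eq_filter _ _ []]
    apply List.filter_congr
    intro c _
    rw [pvIds_length]
  · intro i hi
    rw [pvOuterFold_getD candidates dataset _ hlen0 i hi]
    simp [PySem.List.pyGetD_natCast, List.getD_eq_getElem?_getD, PySem.List.length_pyRange_one]
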